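-- pv_equiv track=rewrite | github.com/curtissmith291/guitar_notes | chord_detector_v3.py | note_value
-- ===== SOURCE A (Python) =====
-- value_notes = {1: 'A', 2: 'A#/Bb', 3: 'B', 4: 'C', 5: 'C#/Db', 6: 'D', 7: 'D#/Eb', 8: 'E', 9: 'F',
--     10: 'F#/Gb', 11: 'G', 12: 'G#/Ab'}
--
-- string_value = {'E': 8, 'A': 1, 'D': 6, 'G': 11, 'B': 3, 'e': 8}
--
-- def note_value(string, fret):
--     '''
--     This functon converts the fret number to a numerical note value
--     '''
--     note_num = string_value[string] + fret
--     # checks if number is >12, if so, subtracts 12 until it's 12 or lower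
--     while True:
--         if note_num > 12:
--             note_num = note_num - 12
--             continue
--         else:
--             break
--     note = value_notes[note_num]
--     return note
-- ===== SOURCE B (Python) =====
-- NOTES = ['A', 'A#/Bb', 'B', 'C', 'C#/Db', 'D', 'D#/Eb', 'E', 'F',
--          'F#/Gb', 'G', 'G#/Ab']
--
-- string_value = {'E': 8, 'A': 1, 'D': 6, 'G': 11, 'B': 3, 'e': 8}
--
-- def note_value(string, fret):
--     """Index a 12-note list with one modulo instead of A's subtract-12 loop + dict lookup."""
--     n = string_value[string] + fret
--     return NOTES[(n - 1) % 12]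
-- ===== Notes on version B (the rewrite author's own statement) =====
-- stated objective: faster
-- what changed: B drops A's subtract-12-until-<=12 while-loop and the 1-based value_notes dict: it indexes a 0-based 12-element note list directly with (n-1) % 12, one O(1) arithmetic step instead of O(fret) subtractions and a dict lookup.
import Mathlib
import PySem

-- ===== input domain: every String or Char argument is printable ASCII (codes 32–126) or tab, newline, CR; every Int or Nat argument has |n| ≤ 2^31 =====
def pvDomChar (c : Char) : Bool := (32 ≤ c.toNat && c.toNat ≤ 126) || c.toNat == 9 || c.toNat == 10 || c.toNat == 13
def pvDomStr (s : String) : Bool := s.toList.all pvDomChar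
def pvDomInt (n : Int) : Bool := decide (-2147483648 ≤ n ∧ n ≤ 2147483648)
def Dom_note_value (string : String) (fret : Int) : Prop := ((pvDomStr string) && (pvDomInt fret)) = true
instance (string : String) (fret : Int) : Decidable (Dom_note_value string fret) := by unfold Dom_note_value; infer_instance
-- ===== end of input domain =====

-- B replaces A's subtract-12 while-loop and 1-based dict lookup by one modulo into a 0-based note list (O(1) vs O(fret)).

-- ===== PORT A =====
def valueNotes : PySem.Dict Int String := PySem.Dict.ofList
  [(1, "A"), (2, "A#/Bb"), (3, "B"), (4, "C"), (5, "C#/Db"), (6, "D"), (7, "D#/Eb"), (8, "E"),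
   (9, "F"), (10, "F#/Gb"), (11, "G"), (12, "G#/Ab")]

def stringValue : PySem.Dict String Int := PySem.Dict.ofList
  [("E", 8), ("A", 1), ("D", 6), ("G", 11), ("B", 3), ("e", 8)]

-- A's while-loop: subtract 12 while note_num > 12
def noteLoop (n : Int) : Int :=
  if n > 12 then noteLoop (n - 12) else n
termination_by n.toNat
decreasing_by omega

def note_value (string : String) (fret : Int) : String :=
  let note_num : Int := (stringValue.getD string 0) + fret   -- KeyError on missing key: excluded by Pre_
  let note_num := noteLoop note_num
  valueNotes.getD note_num ""                                 -- KeyError on note_num ∉ 1..12: excluded by Pre_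

-- ===== PORT B =====
def noteNames : List String :=
  ["A", "A#/Bb", "B", "C", "C#/Db", "D", "D#/Eb", "E", "F", "F#/Gb", "G", "G#/Ab"]

def note_value_alt (string : String) (fret : Int) : String :=
  let n : Int := (stringValue.getD string 0) + fret          -- KeyError on missing key: excluded by Pre_
  (PySem.List.pyGet? noteNames (PySem.Int.mod (n - 1) 12)).getD ""

-- ===== PRECONDITION & SPEC =====
-- Pre_ excludes exactly the inputs on which Python A raises KeyError (unknown string name, or
-- a fret so negative that the final note value is ≤ 0).
def Pre_note_value (string : String) (fret : Int) : Prop :=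
  (string = "E" ∧ 1 ≤ 8 + fret) ∨ (string = "A" ∧ 1 ≤ 1 + fret) ∨ (string = "D" ∧ 1 ≤ 6 + fret) ∨
  (string = "G" ∧ 1 ≤ 11 + fret) ∨ (string = "B" ∧ 1 ≤ 3 + fret) ∨ (string = "e" ∧ 1 ≤ 8 + fret)
instance (string : String) (fret : Int) : Decidable (Pre_note_value string fret) := by
  unfold Pre_note_value; infer_instance

def pvWitness_note_value : String × Int := ("E", 0)


def Spec_note_value (string : String) (fret : Int) (out : String) : Prop := out = note_value_alt string fret
instance (string : String) (fret : Int) (out : String) : Decidable (Spec_note_value string fret out) := by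
  unfold Spec_note_value; infer_instance

-- ===== CLAIM (what is proved, stated in full; the proofs are below) =====
def Claim_equal_note_value : Prop := ∀ (string : String) (fret : Int), Dom_note_value string fret → Pre_note_value string fret → Spec_note_value string fret (note_value string fret)


-- ===== LEMMAS AND PROOFS =====

-- the loop computes the guarded closed form
theorem noteLoop_closed : ∀ (k : Nat) (n : Int), n.toNat ≤ k →
    noteLoop n = if n > 12 then (n - 1) % 12 + 1 else n := by
  intro k
  induction k with
  | zero => intro n hn; rw [noteLoop]; split <;> omega
  | succ k ih =>
    intro n hn
    rw [noteLoop]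
    by_cases h : n > 12
    · rw [if_pos h, if_pos h, ih (n - 12) (by omega)]
      split <;> omega
    · rw [if_neg h, if_neg h]

-- the 1-based dict lookup of A agrees with B's 0-based list indexing for m ∈ [0, 12)
theorem dict_eq_list (m : Int) (h0 : 0 ≤ m) (h1 : m < 12) :
    valueNotes.getD (m + 1) "" = (PySem.List.pyGet? noteNames m).getD "" := by
  interval_cases m <;> decide

-- for n ≥ 1, A's normalized value equals B's index + 1
theorem noteLoop_mod (n : Int) (h : 1 ≤ n) :
    noteLoop n = PySem.Int.mod (n - 1) 12 + 1 := by
  rw [noteLoop_closed n.toNat n le_rfl, PySem.Int.mod_eq_emod_of_pos (by omega)]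
  split <;> omega

-- ===== VERDICT (by name: the statement is the Claim_ definition above) =====
theorem note_value_spec : Claim_equal_note_value := by
  intro string fret _ hpre
  unfold Spec_note_value note_value note_value_alt
  show valueNotes.getD (noteLoop (stringValue.getD string 0 + fret)) "" =
    (PySem.List.pyGet? noteNames (PySem.Int.mod (stringValue.getD string 0 + fret - 1) 12)).getD ""
  have h1 : 1 ≤ stringValue.getD string 0 + fret := by
    rcases hpre with ⟨h, hf⟩ | ⟨h, hf⟩ | ⟨h, hf⟩ | ⟨h, hf⟩ | ⟨h, hf⟩ | ⟨h, hf⟩ <;> subst h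
    · rw [show stringValue.getD "E" 0 = 8 from by decide]; omega
    · rw [show stringValue.getD "A" 0 = 1 from by decide]; omega
    · rw [show stringValue.getD "D" 0 = 6 from by decide]; omega
    · rw [show stringValue.getD "G" 0 = 11 from by decide]; omega
    · rw [show stringValue.getD "B" 0 = 3 from by decide]; omega
    · rw [show stringValue.getD "e" 0 = 8 from by decide]; omega
  rw [noteLoop_mod _ h1]
  have h2 : 0 ≤ PySem.Int.mod (stringValue.getD string 0 + fret - 1) 12 := by
    rw [PySem.Int.mod_eq_emod_of_pos (by omega)]; omega
  have h3 : PySem.Int.mod (stringValue.getD string 0 + fret - 1) 12 < 12 := by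
    rw [PySem.Int.mod_eq_emod_of_pos (by omega)]; omega
  exact dict_eq_list _ h2 h3
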